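-- pv_equiv track=rewrite | github.com/yujuyeon0511/vlm-encoder-alignment | vlm_alignment/analysis/speed_benchmark.py | _generate_dummy_texts
-- ===== SOURCE A (Python) =====
-- from typing import List, Dict, Optional
--
-- def _generate_dummy_texts(n: int) -> List[str]:
--     """Generate dummy texts for benchmarking."""
--     templates = [
--         "What is shown in this image?",
--         "Describe the chart data values.",
--         "Read the table contents.",
--         "What type of document is this?",
--         "Summarize the information presented.",
--     ]
--     return [templates[i % len(templates)] for i in range(n)]
-- ===== SOURCE B (Python) =====
-- from typing import List
--
-- def _generate_dummy_texts(n: int) -> List[str]: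
--     """Generate dummy texts for benchmarking."""
--     templates = [
--         "What is shown in this image?",
--         "Describe the chart data values.",
--         "Read the table contents.",
--         "What type of document is this?",
--         "Summarize the information presented.",
--     ]
--     q, r = divmod(max(n, 0), len(templates))
--     return templates * q + templates[:r]
-- ===== Notes on version B (the rewrite author's own statement) =====
-- stated objective: alternative
-- what changed: Replaces the per-element index-modulo comprehension by block replication: divmod gives full-cycle count q and remainder r, and the result is templates*q + templates[:r].
import Mathlib
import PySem

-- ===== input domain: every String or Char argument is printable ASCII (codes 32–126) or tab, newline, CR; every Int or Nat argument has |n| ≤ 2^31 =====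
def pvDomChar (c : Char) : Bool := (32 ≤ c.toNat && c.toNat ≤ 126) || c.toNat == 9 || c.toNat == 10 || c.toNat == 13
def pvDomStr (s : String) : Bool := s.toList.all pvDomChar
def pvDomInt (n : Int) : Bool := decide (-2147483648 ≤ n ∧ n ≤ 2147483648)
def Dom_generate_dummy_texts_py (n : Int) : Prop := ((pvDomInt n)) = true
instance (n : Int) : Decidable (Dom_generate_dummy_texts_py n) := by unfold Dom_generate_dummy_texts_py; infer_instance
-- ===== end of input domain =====

-- B builds the cycled output by whole-list replication plus a slice (divmod) instead of A's per-element index-modulo comprehension.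


-- ===== PORT A =====
-- the template list both Pythons declare verbatim
def pvTemplates : List String := [
  "What is shown in this image?",
  "Describe the chart data values.",
  "Read the table contents.",
  "What type of document is this?",
  "Summarize the information presented."]

def generate_dummy_texts_py (n : Int) : List String :=
  (PySem.List.pyRange 0 n 1).map
    (fun i => PySem.List.pyGetD pvTemplates (PySem.Int.mod i (PySem.List.len pvTemplates)) "")

-- ===== PORT B =====
def generate_dummy_texts_py_alt (n : Int) : List String :=
  let q := PySem.Int.floordiv (max n 0) (PySem.List.len pvTemplates)
  let r := PySem.Int.mod (max n 0) (PySem.List.len pvTemplates)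
  PySem.List.pyRepeat pvTemplates q ++ PySem.List.slice pvTemplates none (some r)

-- ===== PRECONDITION & SPEC =====
def Spec_generate_dummy_texts_py (n : Int) (out : List String) : Prop := out = generate_dummy_texts_py_alt n
instance (n : Int) (out : List String) : Decidable (Spec_generate_dummy_texts_py n out) := by unfold Spec_generate_dummy_texts_py; infer_instance

-- ===== CLAIM (what is proved, stated in full; the proofs are below) =====
def Claim_equal_generate_dummy_texts_py : Prop := ∀ (n : Int), Dom_generate_dummy_texts_py n → Spec_generate_dummy_texts_py n (generate_dummy_texts_py n)

-- ===== LEMMAS AND PROOFS =====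

lemma pv_len : PySem.List.len pvTemplates = 5 := by
  simp [pvTemplates]

lemma pv_key (m : Nat) :
    (PySem.List.pyRange 0 (m : Int) 1).map
        (fun i => PySem.List.pyGetD pvTemplates (PySem.Int.mod i 5) "")
      = PySem.List.pyRepeat pvTemplates ((m / 5 : Nat) : Int) ++ pvTemplates.take (m % 5) := by
  induction m with
  | zero => simp [PySem.List.pyRepeat]
  | succ m ih =>
    have hcast : ((m + 1 : Nat) : Int) = (m : Int) + 1 := by push_cast; ring
    rw [hcast, PySem.List.pyRange_one_succ_right (by positivity), List.map_append, ih]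
    have hmod : PySem.Int.mod (m : Int) 5 = ((m % 5 : Nat) : Int) := by
      exact_mod_cast PySem.Int.mod_natCast m 5
    simp only [List.map_cons, List.map_nil, hmod]
    rcases (by omega : m % 5 = 0 ∨ m % 5 = 1 ∨ m % 5 = 2 ∨ m % 5 = 3 ∨ m % 5 = 4)
      with h | h | h | h | h
    · rw [h, show (m+1)/5 = m/5 from by omega, show (m+1)%5 = 1 from by omega,
        List.append_assoc]
      congr 1
    · rw [h, show (m+1)/5 = m/5 from by omega, show (m+1)%5 = 2 from by omega,
        List.append_assoc]
      congr 1
    · rw [h, show (m+1)/5 = m/5 from by omega, show (m+1)%5 = 3 from by omega,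
        List.append_assoc]
      congr 1
    · rw [h, show (m+1)/5 = m/5 from by omega, show (m+1)%5 = 4 from by omega,
        List.append_assoc]
      congr 1
    · rw [h, show (m+1)/5 = m/5 + 1 from by omega, show (m+1)%5 = 0 from by omega]
      have hrep : PySem.List.pyRepeat pvTemplates ((m/5 + 1 : Nat) : Int)
          = PySem.List.pyRepeat pvTemplates ((m/5 : Nat) : Int) ++ pvTemplates := by
        show (List.replicate ((m/5 + 1 : Nat) : Int).toNat pvTemplates).flatten
            = (List.replicate ((m/5 : Nat) : Int).toNat pvTemplates).flatten ++ pvTemplates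
        rw [Int.toNat_natCast, Int.toNat_natCast, List.replicate_succ', List.flatten_append]
        simp
      rw [hrep]
      simp only [List.take_zero, List.append_nil, List.append_assoc]
      congr 1

-- ===== VERDICT (by name: the statement is the Claim_ definition above) =====
theorem generate_dummy_texts_py_spec : Claim_equal_generate_dummy_texts_py := by
  intro n _
  unfold Spec_generate_dummy_texts_py generate_dummy_texts_py generate_dummy_texts_py_alt
  simp only [pv_len]
  by_cases hn : n ≤ 0
  · rw [PySem.List.pyRange_one_eq_nil hn, show max n 0 = 0 from by omega]
    decide
  · rw [show max n 0 = n from by omega, show n = ((n.toNat : Nat) : Int) from by omega]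
    have hd : PySem.Int.floordiv ((n.toNat : Nat) : Int) 5 = ((n.toNat / 5 : Nat) : Int) := by
      exact_mod_cast PySem.Int.floordiv_natCast n.toNat 5
    have hm : PySem.Int.mod ((n.toNat : Nat) : Int) 5 = ((n.toNat % 5 : Nat) : Int) := by
      exact_mod_cast PySem.Int.mod_natCast n.toNat 5
    rw [hd, hm, PySem.List.slice_to_natCast]
    exact pv_key n.toNat
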